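-- pv_equiv track=rewrite | github.com/dokyung36d/programmersCodingTest | 1일차 - Flatten.py | solution
-- ===== SOURCE A (Python) =====
-- import bisect
--
-- def solution(numDump, mapInfo):
--     sortedMapInfo = [mapInfo[0]]
--     for i in range(1, len(mapInfo)):
--         insertIndex = bisect.bisect_left(sortedMapInfo, mapInfo[i])
--         sortedMapInfo.insert(insertIndex, mapInfo[i])
--
--
--     for _ in range(numDump):
--         minNum = sortedMapInfo.pop(0)
--         maxNum = sortedMapInfo.pop(-1)
--
--         minNum += 1
--         maxNum -= 1
--
--         minNumIndex = bisect.bisect_left(sortedMapInfo, minNum)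
--         sortedMapInfo.insert(minNumIndex, minNum)
--
--         maxNumIndex = bisect.bisect_left(sortedMapInfo, maxNum)
--         sortedMapInfo.insert(maxNumIndex, maxNum)
--
--     return sortedMapInfo[-1] - sortedMapInfo[0]
-- ===== SOURCE B (Python) =====
-- def solution(numDump, mapInfo):
--     cnt = {}
--     lo = hi = mapInfo[0]
--     for v in mapInfo:
--         cnt[v] = cnt.get(v, 0) + 1
--         if v < lo:
--             lo = v
--         if v > hi:
--             hi = v
--     for _ in range(numDump):
--         cnt[lo] = cnt.get(lo, 0) - 1
--         cnt[hi] = cnt.get(hi, 0) - 1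
--         a = lo + 1
--         b = hi - 1
--         cnt[a] = cnt.get(a, 0) + 1
--         cnt[b] = cnt.get(b, 0) + 1
--         nlo = a if a < b else b
--         if cnt.get(lo, 0) > 0 and lo < nlo:
--             nlo = lo
--         nhi = a if a > b else b
--         if cnt.get(hi, 0) > 0 and hi > nhi:
--             nhi = hi
--         lo, hi = nlo, nhi
--     return hi - lo
-- ===== Notes on version B (the rewrite author's own statement) =====
-- stated objective: faster
-- what changed: B replaces the sorted list maintained by bisect+insert (O(n) per dump and O(n^2) to build) with a value->count dictionary plus tracked min/max, updating each dump in O(1) because the new extremes can only be lo, lo+1 or hi-1 (resp. hi, hi-1, lo+1).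
import Mathlib
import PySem

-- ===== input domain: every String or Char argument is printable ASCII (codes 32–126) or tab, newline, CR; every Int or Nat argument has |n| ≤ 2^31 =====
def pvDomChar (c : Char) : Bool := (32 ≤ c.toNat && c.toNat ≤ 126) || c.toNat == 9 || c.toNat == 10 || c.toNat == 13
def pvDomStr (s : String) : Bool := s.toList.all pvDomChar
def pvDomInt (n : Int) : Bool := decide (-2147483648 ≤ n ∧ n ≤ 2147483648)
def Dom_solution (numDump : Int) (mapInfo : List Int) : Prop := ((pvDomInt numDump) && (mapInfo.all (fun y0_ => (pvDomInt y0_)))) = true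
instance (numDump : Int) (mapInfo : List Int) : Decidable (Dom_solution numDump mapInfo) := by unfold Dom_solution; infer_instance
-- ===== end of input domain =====

-- B replaces A's bisect-maintained sorted list (O(n) work per dump) by a value->count dict with
-- tracked min/max updated in O(1) per dump; the equivalence below is about the return value.

-- ===== PORT A =====
-- one pass of A's dump loop body: pop min (index 0), pop max (index -1), re-insert min+1 and max-1 at their bisect_left positions
def aStep (l : List Int) : List Int :=
  match PySem.List.pop? l 0 with
  | none => l
  | some (minNum, l1) =>
    match PySem.List.pop? l1 with
    | none => l1
    | some (maxNum, l2) =>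
      let minNum := minNum + 1
      let maxNum := maxNum - 1
      let l3 := PySem.List.insert l2 ((PySem.List.bisectLeft l2 minNum : Nat) : Int) minNum
      PySem.List.insert l3 ((PySem.List.bisectLeft l3 maxNum : Nat) : Int) maxNum

def solution (numDump : Int) (mapInfo : List Int) : Int :=
  match PySem.List.pyGet? mapInfo 0 with
  | none => 0
  | some x0 =>
    let sorted0 := (PySem.List.pyRange 1 (PySem.List.len mapInfo) 1).foldl
      (fun acc i =>
        PySem.List.insert acc
          ((PySem.List.bisectLeft acc (PySem.List.pyGetD mapInfo i 0) : Nat) : Int)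
          (PySem.List.pyGetD mapInfo i 0)) [x0]
    let final := (PySem.List.pyRange 0 numDump 1).foldl (fun l _ => aStep l) sorted0
    PySem.List.pyGetD final (-1) 0 - PySem.List.pyGetD final 0 0

-- ===== PORT B =====
-- B's counting pass: cnt[v] = cnt.get(v, 0) + 1, track running min and max
def bAdd (s : PySem.Dict Int Int × Int × Int) (v : Int) : PySem.Dict Int Int × Int × Int :=
  (s.1.insert v (s.1.getD v 0 + 1),
   if v < s.2.1 then v else s.2.1,
   if v > s.2.2 then v else s.2.2)

-- B's dump loop body: O(1) count updates; candidate new extremes are {lo, lo+1, hi-1} resp. {hi, hi-1, lo+1}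
def bStep (s : PySem.Dict Int Int × Int × Int) : PySem.Dict Int Int × Int × Int :=
  let lo := s.2.1
  let hi := s.2.2
  let cnt := s.1.insert lo (s.1.getD lo 0 - 1)
  let cnt := cnt.insert hi (cnt.getD hi 0 - 1)
  let a := lo + 1
  let b := hi - 1
  let cnt := cnt.insert a (cnt.getD a 0 + 1)
  let cnt := cnt.insert b (cnt.getD b 0 + 1)
  let nlo := if a < b then a else b
  let nlo := if cnt.getD lo 0 > 0 ∧ lo < nlo then lo else nlo
  let nhi := if a > b then a else b
  let nhi := if cnt.getD hi 0 > 0 ∧ hi > nhi then hi else nhi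
  (cnt, nlo, nhi)

def solution_alt (numDump : Int) (mapInfo : List Int) : Int :=
  match mapInfo with
  | [] => 0
  | x0 :: _ =>
    let s0 := mapInfo.foldl bAdd (PySem.Dict.empty, x0, x0)
    let sF := (PySem.List.pyRange 0 numDump 1).foldl (fun s _ => bStep s) s0
    sF.2.2 - sF.2.1

-- ===== PRECONDITION & SPEC =====
-- Pre_ excludes exactly the inputs where Python A raises IndexError: the empty list, and a
-- one-element list together with numDump >= 1 (the second pop of the first dump is from []).
def Pre_solution (numDump : Int) (mapInfo : List Int) : Prop :=
  mapInfo ≠ [] ∧ (numDump ≤ 0 ∨ 2 ≤ mapInfo.length)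
instance (numDump : Int) (mapInfo : List Int) : Decidable (Pre_solution numDump mapInfo) := by
  unfold Pre_solution; infer_instance

def pvWitness_solution : Int × List Int := (2, [1, 5, 3])

def Spec_solution (numDump : Int) (mapInfo : List Int) (out : Int) : Prop := out = solution_alt numDump mapInfo
instance (numDump : Int) (mapInfo : List Int) (out : Int) : Decidable (Spec_solution numDump mapInfo out) := by unfold Spec_solution; infer_instance

-- ===== CLAIM (what is proved, stated in full; the proofs are below) =====
def Claim_equal_solution : Prop := ∀ (numDump : Int) (mapInfo : List Int), Dom_solution numDump mapInfo → Pre_solution numDump mapInfo → Spec_solution numDump mapInfo (solution numDump mapInfo)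

-- ===== LEMMAS AND PROOFS =====

-- The relation the two simulations preserve: l is A's sorted list, s is B's (counts, lo, hi) state.
def SimRel (l : List Int) (s : PySem.Dict Int Int × Int × Int) : Prop :=
  l.Pairwise (· ≤ ·) ∧ l ≠ [] ∧
  (∀ v : Int, s.1.getD v 0 = (l.count v : Int)) ∧
  (s.2.1 ∈ l ∧ ∀ y ∈ l, s.2.1 ≤ y) ∧
  (s.2.2 ∈ l ∧ ∀ y ∈ l, y ≤ s.2.2)

-- A's bisect_left + insert on a sorted list keeps it sorted and is a permutation of consing
theorem bins_sorted_perm (w : List Int) (x : Int) (hw : w.Pairwise (· ≤ ·)) :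
    (PySem.List.insert w ((PySem.List.bisectLeft w x : Nat) : Int) x).Pairwise (· ≤ ·) ∧
    (PySem.List.insert w ((PySem.List.bisectLeft w x : Nat) : Int) x).Perm (x :: w) := by
  obtain ⟨hple, hlt, hge⟩ := PySem.List.bisectLeft_spec w x hw
  set p := PySem.List.bisectLeft w x with hp
  rw [PySem.List.insert_natCast w p x hple]
  constructor
  · rw [List.pairwise_append]
    refine ⟨hw.sublist (List.take_sublist _ _), ?_, ?_⟩
    · rw [List.pairwise_cons]
      refine ⟨?_, hw.sublist (List.drop_sublist _ _)⟩
      intro y hy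
      obtain ⟨j, hj, rfl⟩ := List.mem_iff_getElem.mp hy
      rw [List.getElem_drop]
      exact hge _ (by simp at hj; omega) (by omega)
    · intro a ha b hb
      obtain ⟨j, hj, rfl⟩ := List.mem_iff_getElem.mp ha
      rw [List.getElem_take] at *
      have hjp : j < p := by simp at hj; omega
      have haxlt : w[j]'(by simp at hj; omega) < x := hlt _ _ hjp
      rcases List.mem_cons.mp hb with rfl | hb
      · exact le_of_lt haxlt
      · obtain ⟨k, hk, rfl⟩ := List.mem_iff_getElem.mp hb
        rw [List.getElem_drop]
        exact le_trans (le_of_lt haxlt) (hge _ (by simp at hk; omega) (by omega))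
  · have h := @List.perm_middle _ x (w.take p) (w.drop p)
    rwa [List.take_append_drop] at h

-- in a sorted list every element is at most the last one
theorem sorted_le_getLast (l : List Int) (h : l ≠ []) (hs : l.Pairwise (· ≤ ·)) (y : Int)
    (hy : y ∈ l) : y ≤ l.getLast h := by
  rw [List.getLast_eq_getElem]
  obtain ⟨j, hj, rfl⟩ := List.mem_iff_getElem.mp hy
  rcases Nat.lt_or_ge j (l.length - 1) with hlt | hge
  · exact (List.pairwise_iff_getElem.mp hs) j (l.length - 1) hj (by omega) hlt
  · have : j = l.length - 1 := by omega
    subst this; exact le_refl _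

theorem simrel_bAdd (l : List Int) (s : PySem.Dict Int Int × Int × Int) (v : Int) (h : SimRel l s) :
    SimRel (PySem.List.insert l ((PySem.List.bisectLeft l v : Nat) : Int) v) (bAdd s v) := by
  obtain ⟨hs, hne, hcnt, ⟨hloMem, hloLe⟩, ⟨hhiMem, hhiLe⟩⟩ := h
  obtain ⟨hs', hperm⟩ := bins_sorted_perm l v hs
  refine ⟨hs', ?_, ?_, ?_, ?_⟩
  · intro hnil; have := hperm.length_eq; simp [hnil] at this
  · intro w
    rw [hperm.count_eq, List.count_cons]
    simp only [bAdd, PySem.Dict.getD_insert]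
    by_cases hw : w = v
    · subst hw; simp [hcnt]
    · simp [hw, hcnt, Ne.symm hw]
  · constructor
    · rw [hperm.mem_iff]
      simp only [bAdd]
      split <;> simp [hloMem]
    · intro y hy
      rw [hperm.mem_iff] at hy
      simp only [bAdd]
      rcases List.mem_cons.mp hy with rfl | hy
      · split <;> [exact le_refl y; omega]
      · have := hloLe y hy; split <;> omega
  · constructor
    · rw [hperm.mem_iff]
      simp only [bAdd]
      split <;> simp [hhiMem]
    · intro y hy
      rw [hperm.mem_iff] at hy
      simp only [bAdd]
      rcases List.mem_cons.mp hy with rfl | hy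
      · split <;> [exact le_refl y; omega]
      · have := hhiLe y hy; split <;> omega

theorem simrel_bStep (l : List Int) (s : PySem.Dict Int Int × Int × Int) (h : SimRel l s)
    (hlen : 2 ≤ l.length) : SimRel (aStep l) (bStep s) ∧ (aStep l).length = l.length := by
  obtain ⟨d, lo, hi⟩ := s
  obtain ⟨hsort, hne, hcnt, ⟨hloMem, hloLe⟩, ⟨hhiMem, hhiLe⟩⟩ := h
  simp only at hcnt hloMem hloLe hhiMem hhiLe
  -- decompose l = hd :: m ++ [z]
  obtain ⟨hd, t, rfl⟩ := List.exists_cons_of_ne_nil hne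
  have htne : t ≠ [] := by intro ht; subst ht; simp at hlen
  obtain ⟨m, z, rfl⟩ : ∃ m z, t = m ++ [z] :=
    ⟨t.dropLast, t.getLast htne, (List.dropLast_append_getLast htne).symm⟩
  -- basic order facts
  have hsort' := hsort
  rw [List.pairwise_cons] at hsort'
  obtain ⟨hhd_le, hts⟩ := hsort'
  rw [List.pairwise_append] at hts
  obtain ⟨hms, _, hmz⟩ := hts
  have hm_lo : ∀ y ∈ m, hd ≤ y := fun y hy => hhd_le y (by simp [hy])
  have hm_hi : ∀ y ∈ m, y ≤ z := fun y hy => hmz y hy z (by simp)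
  have hhdz : hd ≤ z := hhd_le z (by simp)
  -- lo = hd, hi = z
  have hlo : lo = hd := by
    have h1 : lo ≤ hd := hloLe hd (by simp)
    have h2 : hd ≤ lo := by
      rcases List.mem_cons.mp hloMem with h' | h'
      · omega
      · exact hhd_le _ h'
    omega
  have hhi : hi = z := by
    have h1 : z ≤ hi := hhiLe z (by simp)
    have h2 : hi ≤ z := by
      rcases List.mem_cons.mp hhiMem with h' | h'
      · omega
      · rcases List.mem_append.mp h' with h'' | h''
        · exact hmz _ h'' z (by simp)
        · simp at h''; omega
    omega
  subst hlo hhi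
  -- reduce aStep
  have haStep : aStep (lo :: (m ++ [hi])) =
      PySem.List.insert
        (PySem.List.insert m ((PySem.List.bisectLeft m (lo+1) : Nat) : Int) (lo+1))
        ((PySem.List.bisectLeft (PySem.List.insert m ((PySem.List.bisectLeft m (lo+1) : Nat) : Int) (lo+1)) (hi-1) : Nat) : Int) (hi-1) := by
    simp [aStep, PySem.List.pop?_zero_cons, PySem.List.pop?_last]
  set l3 := PySem.List.insert m ((PySem.List.bisectLeft m (lo+1) : Nat) : Int) (lo+1) with hl3
  obtain ⟨hs3, hp3⟩ := bins_sorted_perm m (lo+1) hms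
  obtain ⟨hs4, hp4⟩ := bins_sorted_perm l3 (hi-1) hs3
  set l4 := PySem.List.insert l3 ((PySem.List.bisectLeft l3 (hi-1) : Nat) : Int) (hi-1) with hl4
  have hperm : l4.Perm ((hi-1) :: (lo+1) :: m) := hp4.trans (List.Perm.cons _ hp3)
  have hlen4 : l4.length = (lo :: (m ++ [hi])).length := by
    rw [hperm.length_eq]; simp
  -- the dict after the four inserts of bStep, pointwise
  have hbase : ∀ v : Int, d.getD v 0 =
      (m.count v : Int) + (if v = lo then 1 else 0) + (if v = hi then 1 else 0) := by
    intro v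
    rw [hcnt v]
    simp [List.count_cons, List.count_append]
    split_ifs <;> omega
  have hbStep : bStep (d, lo, hi) =
      (let c1 := d.insert lo (d.getD lo 0 - 1)
       let c2 := c1.insert hi (c1.getD hi 0 - 1)
       let c3 := c2.insert (lo+1) (c2.getD (lo+1) 0 + 1)
       let c4 := c3.insert (hi-1) (c3.getD (hi-1) 0 + 1)
       let nlo := if lo+1 < hi-1 then lo+1 else hi-1
       let nlo := if c4.getD lo 0 > 0 ∧ lo < nlo then lo else nlo
       let nhi := if lo+1 > hi-1 then lo+1 else hi-1
       let nhi := if c4.getD hi 0 > 0 ∧ hi > nhi then hi else nhi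
       (c4, nlo, nhi)) := by
    simp only [bStep]
  set c1 := d.insert lo (d.getD lo 0 - 1) with hc1d
  set c2 := c1.insert hi (c1.getD hi 0 - 1) with hc2d
  set c3 := c2.insert (lo+1) (c2.getD (lo+1) 0 + 1) with hc3d
  set c4 := c3.insert (hi-1) (c3.getD (hi-1) 0 + 1) with hc4d
  have e1 : ∀ v : Int, c1.getD v 0 = d.getD v 0 - (if v = lo then 1 else 0) := by
    intro v
    rw [hc1d, PySem.Dict.getD_insert]
    split_ifs <;> first | omega | (subst_vars; omega)
  have e2 : ∀ v : Int, c2.getD v 0 = d.getD v 0 - (if v = lo then 1 else 0) - (if v = hi then 1 else 0) := by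
    intro v
    rw [hc2d, PySem.Dict.getD_insert, e1 v, e1 hi]
    split_ifs <;> first | omega | (subst_vars; omega)
  have e3 : ∀ v : Int, c3.getD v 0 = d.getD v 0 - (if v = lo then 1 else 0) - (if v = hi then 1 else 0) + (if v = lo+1 then 1 else 0) := by
    intro v
    rw [hc3d, PySem.Dict.getD_insert, e2 v, e2 (lo+1)]
    split_ifs <;> first | omega | (subst_vars; omega)
  have e4 : ∀ v : Int, c4.getD v 0 = d.getD v 0 - (if v = lo then 1 else 0) - (if v = hi then 1 else 0) + (if v = lo+1 then 1 else 0) + (if v = hi-1 then 1 else 0) := by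
    intro v
    rw [hc4d, PySem.Dict.getD_insert, e3 v, e3 (hi-1)]
    split_ifs <;> first | omega | (subst_vars; omega)
  have hcount4 : ∀ v : Int, (l4.count v : Int) =
      (m.count v : Int) + (if v = lo+1 then 1 else 0) + (if v = hi-1 then 1 else 0) := by
    intro v
    rw [hperm.count_eq]
    simp [List.count_cons]
    split_ifs <;> omega
  have hc4 : ∀ v : Int, c4.getD v 0 = (l4.count v : Int) := by
    intro v
    rw [e4 v, hcount4 v, hbase v]
    split_ifs <;> omega
  -- membership characterisation
  have hmem4 : ∀ y : Int, y ∈ l4 ↔ (y = hi-1 ∨ y = lo+1 ∨ y ∈ m) := by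
    intro y; rw [hperm.mem_iff]; simp
  have hpos : ∀ v : Int, (c4.getD v 0 > 0) ↔ v ∈ l4 := by
    intro v
    rw [hc4 v]
    constructor
    · intro h'; exact List.count_pos_iff.mp (by exact_mod_cast h')
    · intro h'; exact_mod_cast Nat.cast_pos.mpr (List.count_pos_iff.mpr h')
  -- bStep components
  have hb1 : (bStep (d, lo, hi)).1 = c4 := by rw [hbStep]
  have hb2 : (bStep (d, lo, hi)).2.1 =
      (if c4.getD lo 0 > 0 ∧ lo < (if lo+1 < hi-1 then lo+1 else hi-1) then lo
       else (if lo+1 < hi-1 then lo+1 else hi-1)) := by rw [hbStep]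
  have hb3 : (bStep (d, lo, hi)).2.2 =
      (if c4.getD hi 0 > 0 ∧ hi > (if lo+1 > hi-1 then lo+1 else hi-1) then hi
       else (if lo+1 > hi-1 then lo+1 else hi-1)) := by rw [hbStep]
  rw [haStep]
  refine ⟨⟨hs4, ?_, ?_, ?_, ?_⟩, hlen4⟩
  · intro h0; rw [h0] at hlen4; simp at hlen4
  · intro v; rw [hb1]; exact hc4 v
  · -- minimum
    rw [hb2]
    by_cases hC : c4.getD lo 0 > 0 ∧ lo < (if lo+1 < hi-1 then lo+1 else hi-1)
    · rw [if_pos hC]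
      obtain ⟨hCp, hClt⟩ := hC
      refine ⟨(hpos lo).mp hCp, ?_⟩
      intro y hy
      rcases (hmem4 y).mp hy with rfl | rfl | hy'
      · split_ifs at hClt <;> omega
      · split_ifs at hClt <;> omega
      · exact hm_lo y hy'
    · rw [if_neg hC]
      constructor
      · rw [hmem4]; split_ifs <;> simp
      · intro y hy
        rcases (hmem4 y).mp hy with rfl | rfl | hy'
        · split_ifs <;> omega
        · split_ifs <;> omega
        · rcases eq_or_lt_of_le (hm_lo y hy') with rfl | hlt
          · have hymem : lo ∈ l4 := (hmem4 lo).mpr (Or.inr (Or.inr hy'))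
            have := (hpos lo).mpr hymem
            split_ifs <;> omega
          · split_ifs <;> omega
  · -- maximum
    rw [hb3]
    by_cases hC : c4.getD hi 0 > 0 ∧ hi > (if lo+1 > hi-1 then lo+1 else hi-1)
    · rw [if_pos hC]
      obtain ⟨hCp, hClt⟩ := hC
      refine ⟨(hpos hi).mp hCp, ?_⟩
      intro y hy
      rcases (hmem4 y).mp hy with rfl | rfl | hy'
      · split_ifs at hClt <;> omega
      · split_ifs at hClt <;> omega
      · exact hm_hi y hy'
    · rw [if_neg hC]
      constructor
      · rw [hmem4]; split_ifs <;> simp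
      · intro y hy
        rcases (hmem4 y).mp hy with rfl | rfl | hy'
        · split_ifs <;> omega
        · split_ifs <;> omega
        · rcases eq_or_lt_of_le (hm_hi y hy') with rfl | hlt
          · have hymem : y ∈ l4 := (hmem4 y).mpr (Or.inr (Or.inr hy'))
            have := (hpos y).mpr hymem
            split_ifs <;> omega
          · split_ifs <;> omega

theorem simrel_out (l : List Int) (s : PySem.Dict Int Int × Int × Int) (h : SimRel l s) :
    PySem.List.pyGetD l (-1) 0 - PySem.List.pyGetD l 0 0 = s.2.2 - s.2.1 := by
  obtain ⟨hsort, hne, -, ⟨hloMem, hloLe⟩, ⟨hhiMem, hhiLe⟩⟩ := h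
  have h0 : PySem.List.pyGetD l 0 0 = s.2.1 := by
    obtain ⟨c, cs, rfl⟩ := List.exists_cons_of_ne_nil hne
    rw [PySem.List.pyGetD_zero_cons]
    have h1 : s.2.1 ≤ c := hloLe c (by simp)
    have h2 : c ≤ s.2.1 := by
      rcases List.mem_cons.mp hloMem with h' | h'
      · omega
      · exact (List.pairwise_cons.mp hsort).1 _ h'
    omega
  have h1 : PySem.List.pyGetD l (-1) 0 = s.2.2 := by
    rw [PySem.List.pyGetD_neg_one l 0 hne]
    have h2 : l.getLast hne ≤ s.2.2 := hhiLe _ (List.getLast_mem hne)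
    have h3 : s.2.2 ≤ l.getLast hne := sorted_le_getLast l hne hsort _ hhiMem
    omega
  omega

theorem foldl_const_iterate {α β : Type} (f : α → α) (L : List β) (init : α) :
    L.foldl (fun x _ => f x) init = f^[L.length] init := by
  induction L generalizing init with
  | nil => rfl
  | cons b t ih => simp [List.foldl_cons, ih, Function.iterate_succ_apply]

theorem simrel_iter (n : Nat) (l : List Int) (s : PySem.Dict Int Int × Int × Int)
    (h : SimRel l s) (hlen : 2 ≤ l.length) : SimRel (aStep^[n] l) (bStep^[n] s) := by
  induction n generalizing l s with
  | zero => simp only [Function.iterate_zero, id]; exact h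
  | succ n ih =>
    rw [Function.iterate_succ_apply, Function.iterate_succ_apply]
    obtain ⟨h', hlen'⟩ := simrel_bStep l s h hlen
    exact ih _ _ h' (by omega)

theorem simrel_build (todo : List Int) (l : List Int) (s : PySem.Dict Int Int × Int × Int)
    (h : SimRel l s) :
    SimRel (todo.foldl (fun acc v => PySem.List.insert acc ((PySem.List.bisectLeft acc v : Nat) : Int) v) l)
      (todo.foldl bAdd s) ∧
    (todo.foldl (fun acc v => PySem.List.insert acc ((PySem.List.bisectLeft acc v : Nat) : Int) v) l).length
      = l.length + todo.length := by
  induction todo generalizing l s with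
  | nil => simp only [List.foldl_nil, List.length_nil]; exact ⟨h, by omega⟩
  | cons v t ih =>
    simp only [List.foldl_cons, List.length_cons]
    obtain ⟨hs', hl'⟩ := ih _ _ (simrel_bAdd l s v h)
    refine ⟨hs', ?_⟩
    rw [hl']
    have : (PySem.List.insert l ((PySem.List.bisectLeft l v : Nat) : Int) v).length = l.length + 1 := by
      have hpl := (bins_sorted_perm l v (h.1)).2.length_eq
      simp only [List.length_cons] at hpl
      omega
    omega

theorem simrel_start (x0 : Int) : SimRel [x0] (bAdd (PySem.Dict.empty, x0, x0) x0) := by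
  refine ⟨by simp, by simp, ?_, ?_, ?_⟩
  · intro v
    simp only [bAdd, PySem.Dict.getD_insert, PySem.Dict.getD_empty, List.count_cons,
      List.count_nil]
    split_ifs <;> simp_all
  · simp [bAdd]
  · simp [bAdd]

theorem solution_eq (numDump : Int) (mapInfo : List Int) (hne : mapInfo ≠ [])
    (hcase : numDump ≤ 0 ∨ 2 ≤ mapInfo.length) :
    solution numDump mapInfo = solution_alt numDump mapInfo := by
  obtain ⟨x0, rest, rfl⟩ := List.exists_cons_of_ne_nil hne
  rw [solution, solution_alt]
  simp only [PySem.List.pyGet?_zero_cons]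
  -- A's initial sorted list is an insertion fold over rest
  have hbridge := PySem.List.foldl_pyRange_pyGetD (xs := x0 :: rest) (d := 0)
    (f := fun acc v => PySem.List.insert acc ((PySem.List.bisectLeft acc v : Nat) : Int) v)
    (init := [x0]) (a := 1) (by norm_num)
  rw [hbridge]
  simp only [Int.toNat_one, List.drop_succ_cons, List.drop_zero, List.foldl_cons]
  -- the two initial states are related
  obtain ⟨h0, hlen0⟩ := simrel_build rest [x0] (bAdd (PySem.Dict.empty, x0, x0) x0) (simrel_start x0)
  set l0 := rest.foldl (fun acc v => PySem.List.insert acc ((PySem.List.bisectLeft acc v : Nat) : Int) v) [x0] with hl0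
  set s0 := rest.foldl bAdd (bAdd (PySem.Dict.empty, x0, x0) x0) with hs0
  rw [foldl_const_iterate aStep, foldl_const_iterate bStep]
  rcases hcase with hnd | hlen2
  · rw [PySem.List.pyRange_one_eq_nil hnd]
    exact simrel_out l0 s0 h0
  · have hfin := simrel_iter (PySem.List.pyRange 0 numDump 1).length l0 s0 h0
      (by simp at hlen2 hlen0 ⊢; omega)
    exact simrel_out _ _ hfin

-- ===== VERDICT (by name: the statement is the Claim_ definition above) =====
theorem solution_spec : Claim_equal_solution := by
  intro numDump mapInfo _hdom hpre
  unfold Spec_solution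
  exact solution_eq numDump mapInfo hpre.1 hpre.2
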